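-- pv_equiv track=rewrite | github.com/Erveftick/magicXform | magicXform/gcd.py | find_gcd_and_combination
-- ===== SOURCE A (Python) =====
-- from math import gcd
--
-- def find_gcd_and_combination(magic_values):
--     """
--     Calculate the greatest common divisor (GCD) of the entire list and
--     find a combination of elements that yields a GCD greater than or
--     equal to 2. If there is GCD < 2 - returns initial list and 1 as GCD
--     """
--     # Calculate the GCD of the entire list
--     current_gcd = magic_values[0]
--     for i in range(1, len(magic_values)):
--         current_gcd = gcd(current_gcd, magic_values[i])
--
--     # Check if the GCD is greater than 2 and return result instantly
--     if current_gcd >= 2: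
--         return tuple(magic_values), current_gcd
--
--     # If GCD is less than 2, try combinations by removing one element at a time
--     n = len(magic_values)
--     for i in range(n):
--         combination = magic_values[:i] + magic_values[i+1:]
--         current_gcd = combination[0]
--         for j in range(1, len(combination)):
--             current_gcd = gcd(current_gcd, combination[j])
--
--         if current_gcd >= 2:
--             return combination, current_gcd
--
--     # If no suitable combination is found, return initial values and 1
--     return magic_values, 1
-- ===== SOURCE B (Python) =====
-- from math import gcd
--
-- def find_gcd_and_combination(magic_values):
--     # One pass with suffix-reduce array R and running prefix-reduce P:
--     # leave-one-out gcds in O(n) instead of A's O(n^2) rescans.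
--     total = magic_values[0]
--     for v in magic_values[1:]:
--         total = gcd(total, v)
--     if total >= 2:
--         return tuple(magic_values), total
--     n = len(magic_values)
--     # R[k] = left-reduce of gcd over magic_values[k:]
--     R = [magic_values[-1]]
--     for v in reversed(magic_values[:-1]):
--         R.append(gcd(v, R[-1]))
--     R.reverse()
--     P = magic_values[0]
--     for i in range(n):
--         if i == 0:
--             g = R[1]
--         elif i == n - 1:
--             g = P
--         else:
--             g = gcd(P, R[i + 1])
--         if g >= 2:
--             return magic_values[:i] + magic_values[i + 1:], g
--         if i > 0:
--             P = gcd(P, magic_values[i])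
--     return magic_values, 1
-- ===== Notes on version B (the rewrite author's own statement) =====
-- stated objective: faster
-- what changed: A recomputes the gcd of each leave-one-out sublist from scratch (a full rescan per removed index); B precomputes a suffix gcd-reduce array and threads a running prefix gcd-reduce, so each leave-one-out gcd is one gcd call.
-- outside the precondition, e.g. on find_gcd_and_combination([]): A raises IndexError, B raises IndexError; on find_gcd_and_combination([1]): A raises IndexError, B raises IndexError
import Mathlib
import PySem

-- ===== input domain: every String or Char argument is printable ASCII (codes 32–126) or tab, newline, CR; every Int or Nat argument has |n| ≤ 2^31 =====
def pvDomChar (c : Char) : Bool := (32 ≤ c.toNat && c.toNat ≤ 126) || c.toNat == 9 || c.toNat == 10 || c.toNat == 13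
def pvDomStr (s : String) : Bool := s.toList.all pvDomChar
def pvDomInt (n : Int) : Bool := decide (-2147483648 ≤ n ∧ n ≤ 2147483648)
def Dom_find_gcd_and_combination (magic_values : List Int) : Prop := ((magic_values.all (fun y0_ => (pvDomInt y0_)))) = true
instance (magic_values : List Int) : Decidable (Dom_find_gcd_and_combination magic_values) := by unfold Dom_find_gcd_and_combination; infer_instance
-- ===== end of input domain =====

-- B replaces A's quadratic one-element-removal rescans by a suffix gcd array plus a
-- running prefix gcd (leave-one-out gcds in one pass); return value is unchanged.


-- math.gcd: always the nonnegative gcd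
def pygcd (a b : Int) : Int := (Int.gcd a b : Int)

-- `g = l[0]; for x in l[1:]: g = gcd(g, x)` (both Pythons start their gcd loops this way)
def gcd1 (l : List Int) : Int := l.tail.foldl pygcd (l.headD 0)

-- ===== PORT A =====
-- `for i in range(n): combination = mv[:i] + mv[i+1:]; …gcd loop…; if ≥ 2 return`
def removeLoopA (xs : List Int) : List Nat → Option (List Int × Int)
  | [] => none
  | i :: rest =>
    let combination := xs.take i ++ xs.drop (i + 1)
    let g := gcd1 combination
    if g ≥ 2 then some (combination, g) else removeLoopA xs rest

def find_gcd_and_combination (magic_values : List Int) : List Int × Int :=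
  let current_gcd := gcd1 magic_values
  if current_gcd ≥ 2 then (magic_values, current_gcd)
  else
    match removeLoopA magic_values (List.range magic_values.length) with
    | some r => r
    | none => (magic_values, 1)

-- ===== PORT B =====
-- Source B's R array: R[k] = left-reduce of gcd over xs[k:] (built back-to-front)
def suffixR : List Int → List Int
  | [] => []
  | [x] => [x]
  | x :: y :: rest =>
    let R := suffixR (y :: rest)
    pygcd x (R.headD 0) :: R

-- Source B's main loop: P is the running prefix reduce, R gives the suffix reduce
def removeLoopB (xs R : List Int) (n : Nat) : List Nat → Int → Option (List Int × Int)
  | [], _ => none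
  | i :: rest, P =>
    let g := if i = 0 then R.getD 1 0
             else if i = n - 1 then P
             else pygcd P (R.getD (i + 1) 0)
    if g ≥ 2 then some (xs.take i ++ xs.drop (i + 1), g)
    else removeLoopB xs R n rest (if i = 0 then P else pygcd P (xs.getD i 0))

def find_gcd_and_combination_alt (magic_values : List Int) : List Int × Int :=
  let total := gcd1 magic_values
  if total ≥ 2 then (magic_values, total)
  else
    let n := magic_values.length
    let R := suffixR magic_values
    match removeLoopB magic_values R n (List.range n) (magic_values.headD 0) with
    | some r => r
    | none => (magic_values, 1)

-- ===== PRECONDITION & SPEC =====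
-- Pre_ excludes exactly the inputs on which Python A raises IndexError: the empty
-- list, and a singleton [x] with x < 2 (its removal loop indexes an empty list).
def Pre_find_gcd_and_combination (magic_values : List Int) : Prop :=
  magic_values ≠ [] ∧ (magic_values.length = 1 → 2 ≤ magic_values.headD 0)
instance (magic_values : List Int) : Decidable (Pre_find_gcd_and_combination magic_values) := by unfold Pre_find_gcd_and_combination; infer_instance

def pvWitness_find_gcd_and_combination : List Int := [6, 10, 7]

def Spec_find_gcd_and_combination (magic_values : List Int) (out : List Int × Int) : Prop := out = find_gcd_and_combination_alt magic_values
instance (magic_values : List Int) (out : List Int × Int) : Decidable (Spec_find_gcd_and_combination magic_values out) := by unfold Spec_find_gcd_and_combination; infer_instance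

-- ===== CLAIM (what is proved, stated in full; the proofs are below) =====
def Claim_equal_find_gcd_and_combination : Prop := ∀ (magic_values : List Int), Dom_find_gcd_and_combination magic_values → Pre_find_gcd_and_combination magic_values → Spec_find_gcd_and_combination magic_values (find_gcd_and_combination magic_values)

-- ===== LEMMAS AND PROOFS =====

-- gcd of the absolute values of a list (0 for [])
def Gn (l : List Int) : Nat := l.foldr (fun x g => Nat.gcd x.natAbs g) 0

theorem Gn_append (a b : List Int) : Gn (a ++ b) = Nat.gcd (Gn a) (Gn b) := by
  induction a with
  | nil => simp [Gn]
  | cons x t ih => simp [Gn, List.foldr] at ih ⊢; rw [ih, Nat.gcd_assoc]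

theorem foldl_pygcd (l : List Int) (hne : l ≠ []) (g : Int) :
    l.foldl pygcd g = ((Nat.gcd g.natAbs (Gn l) : Nat) : Int) := by
  induction l generalizing g with
  | nil => simp at hne
  | cons x rest ih =>
    cases rest with
    | nil => simp [pygcd, Int.gcd, Gn]
    | cons y r =>
      rw [List.foldl_cons, ih (by simp)]
      simp [pygcd, Int.gcd, Gn, Nat.gcd_assoc]

theorem gcd1_natAbs (l : List Int) (hne : l ≠ []) : (gcd1 l).natAbs = Gn l := by
  cases l with
  | nil => simp at hne
  | cons x t =>
    cases t with
    | nil => simp [gcd1, Gn]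
    | cons y r =>
      simp only [gcd1, List.tail_cons, List.headD_cons]
      rw [foldl_pygcd _ (by simp)]
      simp [Gn]

theorem gcd1_long (x : Int) (t : List Int) (ht : t ≠ []) :
    gcd1 (x :: t) = ((Gn (x :: t) : Nat) : Int) := by
  simp only [gcd1, List.tail_cons, List.headD_cons]
  rw [foldl_pygcd _ ht]
  simp [Gn]

theorem gcd1_append (ys zs : List Int) (hy : ys ≠ []) (hz : zs ≠ []) :
    gcd1 (ys ++ zs) = pygcd (gcd1 ys) (gcd1 zs) := by
  cases ys with
  | nil => simp at hy
  | cons y t =>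
    rw [List.cons_append, gcd1_long y (t ++ zs) (by simp [hz])]
    have hy' : (gcd1 (y :: t)).natAbs = Gn (y :: t) := gcd1_natAbs (y :: t) (by simp)
    have hz' : (gcd1 zs).natAbs = Gn zs := gcd1_natAbs zs hz
    have hpg : pygcd (gcd1 (y :: t)) (gcd1 zs) = ((Nat.gcd (Gn (y :: t)) (Gn zs) : Nat) : Int) := by
      simp [pygcd, Int.gcd, hy', hz']
    rw [hpg]
    have h2 := Gn_append (y :: t) zs
    rw [List.cons_append] at h2
    rw [h2]

theorem suffixR_getD (xs : List Int) (k : Nat) (hk : k < xs.length) :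
    (suffixR xs).getD k 0 = gcd1 (xs.drop k) := by
  induction xs generalizing k with
  | nil => simp at hk
  | cons x t ih =>
    cases t with
    | nil =>
      have hk0 : k = 0 := by simp at hk; omega
      subst hk0
      simp [suffixR, gcd1]
    | cons y r =>
      cases k with
      | zero =>
        have h0 : (suffixR (y :: r)).headD 0 = (suffixR (y :: r)).getD 0 0 := by
          cases h : suffixR (y :: r) <;> simp
        simp only [suffixR, List.getD_cons_zero, List.drop_zero]
        rw [h0, ih 0 (by simp)]
        have := gcd1_append [x] (y :: r) (by simp) (by simp)
        simpa [gcd1] using this.symm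
      | succ k =>
        simp only [suffixR, List.getD_cons_succ, List.drop_succ_cons]
        exact ih k (by simpa using Nat.lt_of_succ_lt_succ hk)

theorem loops_eq (xs : List Int) (hn : 2 ≤ xs.length) :
    ∀ (k i : Nat), i + k = xs.length → ∀ P, P = gcd1 (xs.take (max i 1)) →
      removeLoopB xs (suffixR xs) xs.length (List.range' i k) P
        = removeLoopA xs (List.range' i k) := by
  intro k
  induction k with
  | zero => intro i _ P _; simp [removeLoopA, removeLoopB]
  | succ k ih =>
    intro i hik P hP
    have hi : i < xs.length := by omega
    rw [List.range'_succ]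
    -- the per-index gcd agrees
    have hg : (if i = 0 then (suffixR xs).getD 1 0
              else if i = xs.length - 1 then P
              else pygcd P ((suffixR xs).getD (i + 1) 0))
            = gcd1 (xs.take i ++ xs.drop (i + 1)) := by
      by_cases h0 : i = 0
      · subst h0
        have h1n : 1 < xs.length := by omega
        rw [if_pos rfl, suffixR_getD xs 1 h1n]
        simp
      · rw [if_neg h0]
        have htk : xs.take i ≠ [] := by
          have : (xs.take i).length = i := by simp [Nat.min_eq_left (Nat.le_of_lt hi)]
          intro h; rw [h] at this; simp at this; omega
        have hPi : P = gcd1 (xs.take i) := by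
          rw [hP, Nat.max_eq_left (by omega : 1 ≤ i)]
        by_cases hl : i = xs.length - 1
        · rw [if_pos hl]
          have : xs.drop (i + 1) = [] := by
            apply List.drop_eq_nil_of_le; omega
          rw [this, List.append_nil, hPi]
        · rw [if_neg hl]
          have hi1 : i + 1 < xs.length := by omega
          have hdr : xs.drop (i + 1) ≠ [] := by
            have : (xs.drop (i + 1)).length = xs.length - (i + 1) := by simp
            intro h; rw [h] at this; simp at this; omega
          rw [gcd1_append _ _ htk hdr, hPi, suffixR_getD xs (i + 1) hi1]
    show removeLoopB xs (suffixR xs) xs.length (i :: List.range' (i + 1) k) P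
        = removeLoopA xs (i :: List.range' (i + 1) k)
    rw [removeLoopB, removeLoopA]
    simp only [hg]
    by_cases hge : gcd1 (xs.take i ++ xs.drop (i + 1)) ≥ 2
    · rw [if_pos hge, if_pos hge]
    · rw [if_neg hge, if_neg hge]
      apply ih (i + 1) (by omega)
      by_cases h0 : i = 0
      · subst h0; simp [hP]
      · have hPi : P = gcd1 (xs.take i) := by
          rw [hP, Nat.max_eq_left (by omega : 1 ≤ i)]
        rw [if_neg h0, hPi]
        have hmax : max (i + 1) 1 = i + 1 := by omega
        rw [hmax]
        have htk : xs.take i ≠ [] := by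
          have : (xs.take i).length = i := by simp [Nat.min_eq_left (Nat.le_of_lt hi)]
          intro h; rw [h] at this; simp at this; omega
        have hstep : xs.take (i + 1) = xs.take i ++ [xs.getD i 0] := by
          rw [List.take_add_one]
          congr 1
          rw [List.getElem?_eq_getElem hi]
          simp [List.getD, List.getElem?_eq_getElem hi]
        rw [hstep, gcd1_append _ _ htk (by simp)]
        simp [gcd1]

-- ===== VERDICT (by name: the statement is the Claim_ definition above) =====
theorem find_gcd_and_combination_spec : Claim_equal_find_gcd_and_combination := by
  intro xs _ hpre
  unfold Spec_find_gcd_and_combination find_gcd_and_combination find_gcd_and_combination_alt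
  obtain ⟨hne, h1⟩ := hpre
  by_cases hg : gcd1 xs ≥ 2
  · simp [hg]
  · rw [if_neg hg, if_neg hg]
    have hn : 2 ≤ xs.length := by
      cases xs with
      | nil => simp at hne
      | cons x t =>
        cases t with
        | nil =>
          exfalso; apply hg
          have := h1 (by simp)
          simpa [gcd1] using this
        | cons y r => simp
    have hrange : List.range xs.length = List.range' 0 xs.length := List.range_eq_range'
    have hP0 : xs.headD 0 = gcd1 (xs.take (max 0 1)) := by
      cases xs with
      | nil => simp at hne
      | cons x t => simp [gcd1]
    have hloops := loops_eq xs hn xs.length 0 (by omega) (xs.headD 0) hP0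
    simp only [hrange, ← hloops]
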